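-- pv_equiv track=rewrite | github.com/tylrelutz/barcode_generator | app.py | format_gs1_data
-- ===== SOURCE A (Python) =====
-- FNC1 = chr(202)  # Function 1 symbol for GS1-128
--
-- FIXED_LENGTH_AIS = {
--     '00': 18,  # SSCC
--     '01': 14,  # GTIN
--     '02': 14,  # GTIN of contained trade items
--     '03': 14,  # GTIN of contained trade items
--     '04': 16,  # GTIN
--     '11': 6,   # Production date (YYMMDD)
--     '12': 6,   # Due date (YYMMDD)
--     '13': 6,   # Packaging date (YYMMDD)
--     '14': 6,   # Best before date (YYMMDD)
--     '15': 6,   # Best before date (YYMMDD)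
--     '16': 6,   # Sell by date (YYMMDD)
--     '17': 6,   # Expiration date (YYMMDD)
--     '18': 6,   # Production date (YYMMDD)
--     '19': 6,   # Production date (YYMMDD)
--     '20': 2,   # Product variant
--     '31': 6,   # Net weight (kg)
--     '32': 6,   # Net weight (kg)
--     '33': 6,   # Net weight (kg)
--     '34': 6,   # Net weight (kg)
--     '35': 6,   # Net weight (kg)
--     '36': 6,   # Net weight (kg)
--     '41': 6    # Customer's purchase order number
-- }
--
-- def format_gs1_data(data):
--     """
--     Format data according to GS1-128 specifications:
--     1. Add FNC1 at the start
--     2. Add FNC1 between variable length fields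
--     3. Validate AI lengths
--     """
--     if not data.startswith('('):
--         return data  # Return as is if it's not using AI format
--
--     formatted_data = FNC1  # Start with FNC1
--     current_pos = 0
--
--     while current_pos < len(data):
--         if data[current_pos] != '(':
--             current_pos += 1
--             continue
--
--         # Extract AI
--         ai_start = current_pos + 1
--         ai_end = data.find(')', ai_start)
--         if ai_end == -1:
--             raise ValueError("Invalid AI format: missing closing parenthesis")
--
--         ai = data[ai_start:ai_end]
--         if not ai.isdigit():
--             raise ValueError(f"Invalid AI: {ai}")
--
--         # Add the AI with parentheses
--         formatted_data += data[current_pos:ai_end + 1]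
--
--         # Find the start of the next AI or end of string
--         next_ai_pos = data.find('(', ai_end + 1)
--         if next_ai_pos == -1:
--             next_ai_pos = len(data)
--
--         # Get the value for this AI
--         value = data[ai_end + 1:next_ai_pos]
--
--         # Validate fixed-length AIs
--         if ai in FIXED_LENGTH_AIS:
--             expected_length = FIXED_LENGTH_AIS[ai]
--             if len(value) != expected_length:
--                 raise ValueError(f"AI {ai} requires exactly {expected_length} characters")
--
--         # Add the value
--         formatted_data += value
--
--         # If this is a variable length AI and not the last field, add FNC1
--         if ai not in FIXED_LENGTH_AIS and next_ai_pos < len(data):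
--             formatted_data += FNC1
--
--         current_pos = next_ai_pos
--
--     return formatted_data
-- ===== SOURCE B (Python) =====
-- FNC1 = chr(202)  # Function 1 symbol for GS1-128
--
-- FIXED_LENGTH_AIS = {
--     '00': 18, '01': 14, '02': 14, '03': 14, '04': 16,
--     '11': 6, '12': 6, '13': 6, '14': 6, '15': 6, '16': 6, '17': 6,
--     '18': 6, '19': 6, '20': 2, '31': 6, '32': 6, '33': 6, '34': 6,
--     '35': 6, '36': 6, '41': 6
-- }
--
-- def format_gs1_data(data):
--     """
--     Format data according to GS1-128 specifications:
--     1. Add FNC1 at the start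
--     2. Add FNC1 between variable length fields
--     3. Validate AI lengths
--     """
--     if not data.startswith('('):
--         return data  # Return as is if it's not using AI format
--
--     # First pass: split into (AI, value) pairs on the parenthesis structure.
--     pairs = []
--     for token in data.split('(')[1:]:
--         parts = token.split(')', 1)
--         if len(parts) < 2:
--             raise ValueError("Invalid AI format: missing closing parenthesis")
--         ai, value = parts
--         if not ai.isdigit():
--             raise ValueError(f"Invalid AI: {ai}")
--         pairs.append((ai, value))
--
--     # Second pass: validate lengths and assemble the output.
--     out = [FNC1]
--     for i, (ai, value) in enumerate(pairs):
--         if ai in FIXED_LENGTH_AIS: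
--             expected_length = FIXED_LENGTH_AIS[ai]
--             if len(value) != expected_length:
--                 raise ValueError(f"AI {ai} requires exactly {expected_length} characters")
--         out.append(f"({ai}){value}")
--         if ai not in FIXED_LENGTH_AIS and i < len(pairs) - 1:
--             out.append(FNC1)
--     return ''.join(out)
-- ===== Notes on version B (the rewrite author's own statement) =====
-- stated objective: idiomatic
-- what changed: Replaced the index/find jump loop by a two-pass decomposition: split the input on '(' into tokens, partition each token at the first ')' into (AI, value) pairs, then validate and join the formatted pieces.
import Mathlib
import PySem

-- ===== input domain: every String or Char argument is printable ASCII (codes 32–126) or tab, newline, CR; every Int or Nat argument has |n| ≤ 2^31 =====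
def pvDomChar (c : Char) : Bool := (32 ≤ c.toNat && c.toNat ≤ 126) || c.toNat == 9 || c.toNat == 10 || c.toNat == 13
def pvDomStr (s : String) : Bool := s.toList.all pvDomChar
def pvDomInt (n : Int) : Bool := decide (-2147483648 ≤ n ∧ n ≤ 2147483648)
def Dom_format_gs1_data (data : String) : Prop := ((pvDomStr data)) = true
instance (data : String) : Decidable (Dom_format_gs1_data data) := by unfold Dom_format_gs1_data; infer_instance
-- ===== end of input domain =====

-- B replaces A's index/find jump loop by the idiomatic two-pass decomposition: split on '(' into
-- tokens, partition each token at its first ')' into (AI, value) pairs, then validate and join.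
-- Pre_ excludes exactly the inputs on which the Python A raises ValueError.

-- FNC1 = chr(202)
def pvFNC1 : Char := Char.ofNat 202

-- FIXED_LENGTH_AIS (dict literal, insertion order)
def pvFixedAIs : PySem.Dict String Int := PySem.Dict.mk
  [("00", 18), ("01", 14), ("02", 14), ("03", 14), ("04", 16),
   ("11", 6), ("12", 6), ("13", 6), ("14", 6), ("15", 6), ("16", 6), ("17", 6),
   ("18", 6), ("19", 6), ("20", 2), ("31", 6), ("32", 6), ("33", 6), ("34", 6),
   ("35", 6), ("36", 6), ("41", 6)]

-- ===== PORT A =====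
-- A's while-loop, transcribed on the suffix data[current_pos:] (all of A's index reads — find,
-- slices, the current character — are forward from current_pos, so the suffix carries exactly
-- the state; acc is formatted_data).  Where Python raises ValueError the loop yields [] (those
-- inputs are excluded by Pre_format_gs1_data).
def pvLoopA : List Char → List Char → List Char
  | [], acc => acc
  | c :: rest, acc =>
    if c ≠ '(' then pvLoopA rest acc                              -- data[cur] != '(' : cur += 1
    else
      -- ai_end = data.find(')', ai_start)  (relative to the suffix: rest = data[cur+1:])
      let aiEnd := PySem.Chars.find rest [')']
      if aiEnd = -1 then []                                       -- raise ValueError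
      else
        let ai := rest.take aiEnd.toNat                           -- ai = data[ai_start:ai_end]
        if PySem.Chars.strIsdigit ai = false then []              -- raise ValueError
        else
          let acc1 := acc ++ '(' :: ai ++ [')']                   -- += data[cur:ai_end+1]
          let afterAi := rest.drop (aiEnd.toNat + 1)              -- data[ai_end+1:]
          let nextRel := PySem.Chars.find afterAi ['(']           -- data.find('(', ai_end+1)
          let value := if nextRel = -1 then afterAi else afterAi.take nextRel.toNat
          let k := String.ofList ai
          if pvFixedAIs.contains k = true ∧ (value.length : Int) ≠ pvFixedAIs.getD k 0 then []
          else                                                    -- raise ValueError (length)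
            let acc2 := acc1 ++ value                             -- formatted_data += value
            let acc3 := if pvFixedAIs.contains k = false ∧ nextRel ≠ -1
                        then acc2 ++ [pvFNC1] else acc2           -- FNC1 between variable fields
            pvLoopA (if nextRel = -1 then [] else afterAi.drop nextRel.toNat) acc3
  termination_by s _ => s.length
  decreasing_by
    · simp
    · split <;> simp

def format_gs1_data (data : String) : String :=
  if ¬ PySem.Str.startswith data "(" then data
  else String.ofList (pvLoopA data.toList [pvFNC1])                   -- formatted_data = FNC1; loop

-- ===== PORT B =====
-- first pass of Source B: token.split(')', 1) into (ai, value), checking ')' present and ai.isdigit()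
def pvParse : List (List Char) → Option (List (List Char × List Char))
  | [] => some []
  | t :: ts =>
    match PySem.Chars.splitOnMax t [')'] 1 with
    | [ai, v] =>
        if PySem.Chars.strIsdigit ai = false then none            -- raise ValueError
        else (pvParse ts).map (fun ps => (ai, v) :: ps)           -- pairs.append((ai, value))
    | _ => none                                                   -- raise ValueError (no ')')

-- body of Source B's second (enumerate) loop; n = len(pairs)
def pvBStep (n : Int) (acc : Option (List (List Char))) (ip : Int × (List Char × List Char)) :
    Option (List (List Char)) :=
  acc.bind (fun out =>
    let i := ip.1; let ai := ip.2.1; let v := ip.2.2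
    let k := String.ofList ai
    if pvFixedAIs.contains k = true ∧ (v.length : Int) ≠ pvFixedAIs.getD k 0 then none
    else
      let out := out ++ ['(' :: ai ++ ')' :: v]                   -- out.append(f"({ai}){value}")
      let out := if pvFixedAIs.contains k = false ∧ i < n - 1
                 then out ++ [[pvFNC1]] else out                  -- out.append(FNC1)
      some out)

def format_gs1_data_alt (data : String) : String :=
  if ¬ PySem.Str.startswith data "(" then data
  else
    match pvParse ((PySem.Chars.splitOn data.toList ['(']).tail) with  -- data.split('(')[1:]
    | none => ""
    | some pairs =>
      match (PySem.List.enumerate pairs 0).foldl (pvBStep (pairs.length : Int)) (some [[pvFNC1]]) with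
      | none => ""
      | some pieces => String.ofList (PySem.Chars.join [] pieces)     -- ''.join(out)

-- ===== PRECONDITION & SPEC =====
-- Pre_ excludes exactly the inputs on which A raises ValueError: after the leading '(' every
-- '('-separated token must contain a ')', the AI before it must be all digits (nonempty), and a
-- fixed-length AI's value must have the table's length.
def Pre_format_gs1_data (data : String) : Prop :=
  PySem.Str.startswith data "(" = true →
    ∀ t ∈ (PySem.Chars.splitOn data.toList ['(']).tail,
      ')' ∈ t ∧ PySem.Chars.strIsdigit (t.takeWhile (· ≠ ')')) = true ∧
      (pvFixedAIs.contains (String.ofList (t.takeWhile (· ≠ ')'))) = true →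
        (((t.dropWhile (· ≠ ')')).tail.length : Int)
          = pvFixedAIs.getD (String.ofList (t.takeWhile (· ≠ ')'))) 0))
instance (data : String) : Decidable (Pre_format_gs1_data data) := by
  unfold Pre_format_gs1_data; infer_instance
def pvWitness_format_gs1_data : String := "(01)12345678901234(10)AB"

def Spec_format_gs1_data (data : String) (out : String) : Prop := out = format_gs1_data_alt data
instance (data : String) (out : String) : Decidable (Spec_format_gs1_data data out) := by unfold Spec_format_gs1_data; infer_instance

-- ===== CLAIM (what is proved, stated in full; the proofs are below) =====
def Claim_equal_format_gs1_data : Prop := ∀ (data : String), Dom_format_gs1_data data → Pre_format_gs1_data data → Spec_format_gs1_data data (format_gs1_data data)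

-- ===== LEMMAS AND PROOFS =====

-- the per-token well-formedness Pre_ states (definitionally the body of Pre_)
def pvTokOk (t : List Char) : Prop :=
  ')' ∈ t ∧ PySem.Chars.strIsdigit (t.takeWhile (· ≠ ')')) = true ∧
  (pvFixedAIs.contains (String.ofList (t.takeWhile (· ≠ ')'))) = true →
    (((t.dropWhile (· ≠ ')')).tail.length : Int)
      = pvFixedAIs.getD (String.ofList (t.takeWhile (· ≠ ')'))) 0))

-- what both programs emit for a token list (proof-side specification)
def pvEmit : List (List Char) → List Char
  | [] => []
  | t :: ts =>
    '(' :: t.takeWhile (· ≠ ')') ++ ')' :: (t.dropWhile (· ≠ ')')).tail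
      ++ (if pvFixedAIs.contains (String.ofList (t.takeWhile (· ≠ ')'))) = false ∧ ts ≠ []
          then [pvFNC1] else [])
      ++ pvEmit ts

def pvPieces : List (List Char) → List (List Char)
  | [] => []
  | t :: ts =>
    ('(' :: t.takeWhile (· ≠ ')') ++ ')' :: (t.dropWhile (· ≠ ')')).tail)
      :: (if pvFixedAIs.contains (String.ofList (t.takeWhile (· ≠ ')'))) = false ∧ ts ≠ []
          then [[pvFNC1]] else [])
      ++ pvPieces ts

-- recursive normal form of single-character splitOn
def pvSplit1 (c : Char) : List Char → List Char × List (List Char)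
  | [] => ([], [])
  | x :: xs =>
    if x = c then ([], (pvSplit1 c xs).1 :: (pvSplit1 c xs).2)
    else (x :: (pvSplit1 c xs).1, (pvSplit1 c xs).2)

lemma pvSplitOn_go_eq (c : Char) : ∀ (l : List Char) (fuel : Nat), l.length ≤ fuel →
    ∀ (cur : List Char) (acc : List (List Char)),
    PySem.Chars.splitOn.go [c] fuel l cur acc
      = acc.reverse ++ (cur.reverse ++ (pvSplit1 c l).1) :: (pvSplit1 c l).2 := by
  intro l
  induction l with
  | nil =>
    intro fuel _ cur acc
    cases fuel <;> simp [PySem.Chars.splitOn.go, pvSplit1]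
  | cons x xs ih =>
    intro fuel hf cur acc
    cases fuel with
    | zero => simp at hf
    | succ f =>
      rw [PySem.Chars.splitOn.go.eq_def]
      simp only [List.isPrefixOf, List.drop_one]
      by_cases hx : x = c
      · subst hx
        simp only [BEq.rfl, Bool.true_and, List.isPrefixOf, if_pos,
          List.length_cons, List.length_nil, List.drop_succ_cons, List.drop_zero]
        rw [ih f (by simpa using Nat.le_of_succ_le_succ hf)]
        simp [pvSplit1]
      · have : (c == x) = false := by simpa using fun h => hx h.symm
        simp only [this, Bool.false_and, if_neg Bool.false_ne_true]
        rw [ih f (by simpa using Nat.le_of_succ_le_succ hf)]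
        simp [pvSplit1, hx]

lemma pvSplitOn_eq (c : Char) (l : List Char) :
    PySem.Chars.splitOn l [c] = (pvSplit1 c l).1 :: (pvSplit1 c l).2 := by
  unfold PySem.Chars.splitOn
  rw [pvSplitOn_go_eq c l (l.length + 1) (by omega)]
  simp

lemma pvSplitOn_cons_self (c : Char) (cs : List Char) :
    PySem.Chars.splitOn (c :: cs) [c] = [] :: PySem.Chars.splitOn cs [c] := by
  rw [pvSplitOn_eq, pvSplitOn_eq]
  simp [pvSplit1]

lemma pvSplitOn_glue (c : Char) (cs : List Char) :
    (PySem.Chars.splitOn cs [c]).flatMap (fun t => c :: t) = c :: cs := by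
  rw [pvSplitOn_eq]
  suffices h : ∀ l : List Char,
      (pvSplit1 c l).1 ++ ((pvSplit1 c l).2).flatMap (fun t => c :: t) = l by
    simpa using congrArg (c :: ·) (h cs)
  intro l
  induction l with
  | nil => simp [pvSplit1]
  | cons x xs ih =>
    by_cases hx : x = c
    · subst hx; simp [pvSplit1, ih]
    · simp [pvSplit1, hx, ih]

lemma pvSplitOn_not_mem (c : Char) (cs : List Char) :
    ∀ t ∈ PySem.Chars.splitOn cs [c], c ∉ t := by
  rw [pvSplitOn_eq]
  suffices h : ∀ l : List Char,
      c ∉ (pvSplit1 c l).1 ∧ ∀ t ∈ (pvSplit1 c l).2, c ∉ t by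
    intro t ht
    rcases List.mem_cons.mp ht with h1 | h2
    · exact h1 ▸ (h cs).1
    · exact (h cs).2 t h2
  intro l
  induction l with
  | nil => simp [pvSplit1]
  | cons x xs ih =>
    by_cases hx : x = c
    · subst hx
      refine ⟨by simp [pvSplit1], ?_⟩
      intro t ht
      simp only [pvSplit1, if_pos rfl] at ht
      rcases List.mem_cons.mp ht with h1 | h2
      · exact h1 ▸ ih.1
      · exact ih.2 t h2
    · constructor
      · simp only [pvSplit1, if_neg hx]
        intro hmem
        rcases List.mem_cons.mp hmem with h1 | h2
        · exact hx h1.symm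
        · exact ih.1 h2
      · simpa [pvSplit1, hx] using ih.2

lemma pvSplitOnMax_go_zero (c : Char) (fuel : Nat) (l cur : List Char) (acc : List (List Char)) :
    PySem.Chars.splitOnMax.go [c] fuel 0 l cur acc = acc.reverse ++ [cur.reverse ++ l] := by
  rw [PySem.Chars.splitOnMax.go.eq_def]
  cases fuel <;> cases l <;> simp

lemma pvSplitOnMax_go_one (c : Char) : ∀ (l : List Char) (fuel : Nat), l.length ≤ fuel →
    ∀ (cur : List Char) (acc : List (List Char)),
    PySem.Chars.splitOnMax.go [c] fuel 1 l cur acc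
      = acc.reverse ++
        (if c ∈ l then [cur.reverse ++ l.takeWhile (· ≠ c), (l.dropWhile (· ≠ c)).tail]
         else [cur.reverse ++ l]) := by
  intro l
  induction l with
  | nil =>
    intro fuel _ cur acc
    cases fuel <;> simp [PySem.Chars.splitOnMax.go]
  | cons x xs ih =>
    intro fuel hf cur acc
    cases fuel with
    | zero => simp at hf
    | succ f =>
      rw [PySem.Chars.splitOnMax.go.eq_def]
      simp only [List.isPrefixOf]
      by_cases hx : x = c
      · subst hx
        simp only [BEq.rfl, Bool.true_and, List.isPrefixOf, if_pos,
          List.length_cons, List.length_nil, List.drop_succ_cons, List.drop_zero,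
          OfNat.one_ne_ofNat, if_neg, Nat.sub_self]
        rw [pvSplitOnMax_go_zero]
        simp [List.takeWhile, List.dropWhile]
      · have hbe : (c == x) = false := by simpa using fun h => hx h.symm
        simp only [hbe, Bool.false_and, if_neg Bool.false_ne_true, OfNat.one_ne_ofNat]
        rw [ih f (by simpa using Nat.le_of_succ_le_succ hf)]
        have hxc : (x ≠ c) = True := by simp [hx]
        by_cases hm : c ∈ xs
        · simp [hm, hx, List.takeWhile, List.dropWhile, hxc]
        · simp [hm, hx, List.takeWhile, List.dropWhile, hxc]
          exact fun h => hx h.symm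

lemma pvSplitOnMax_one_mem (c : Char) (t : List Char) (h : c ∈ t) :
    PySem.Chars.splitOnMax t [c] 1 = [t.takeWhile (· ≠ c), (t.dropWhile (· ≠ c)).tail] := by
  unfold PySem.Chars.splitOnMax
  rw [if_neg (by norm_num)]
  rw [show ((1 : Int).toNat) = 1 from rfl]
  rw [pvSplitOnMax_go_one c t (t.length + 1) (by omega)]
  simp [h]

lemma pvDropWhile_cons_not (p : Char → Bool) : ∀ (t : List Char) (y : Char) (ys : List Char),
    t.dropWhile p = y :: ys → p y = false := by
  intro t
  induction t with
  | nil => intro y ys h; simp at h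
  | cons x xs ih =>
    intro y ys h
    by_cases hp : p x
    · rw [List.dropWhile_cons_of_pos hp] at h
      exact ih y ys h
    · rw [List.dropWhile_cons_of_neg hp] at h
      cases h
      simpa using hp

-- first ')' of t: decomposition along takeWhile/dropWhile
lemma pvTok_decomp (c : Char) (t : List Char) (h : c ∈ t) :
    t = t.takeWhile (· ≠ c) ++ c :: (t.dropWhile (· ≠ c)).tail := by
  have hne : t.dropWhile (· ≠ c) ≠ [] := by
    intro hnil
    rw [List.dropWhile_eq_nil_iff] at hnil
    simpa using hnil c h
  obtain ⟨y, ys, hyy⟩ := List.exists_cons_of_ne_nil hne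
  have hhead : y = c := by
    simpa using pvDropWhile_cons_not _ t y ys hyy
  conv_lhs => rw [← List.takeWhile_append_dropWhile (p := fun x => decide (x ≠ c)) (l := t)]
  rw [hyy, hhead]
  simp

lemma pvNotMem_takeWhile (c : Char) (t : List Char) : c ∉ t.takeWhile (· ≠ c) := by
  intro hmem
  have := List.mem_takeWhile_imp hmem
  simp at this

lemma pvFind_not_mem (c : Char) (t : List Char) (h : c ∉ t) :
    PySem.Chars.find t [c] = -1 := by
  rw [PySem.Chars.find_eq_neg_one_iff]
  intro hinf
  exact h (hinf.sublist.mem (by simp))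

lemma pvFind_append_cons (c : Char) (p r : List Char) (h : c ∉ p) :
    PySem.Chars.find (p ++ c :: r) [c] = (p.length : Int) := by
  have hinf : [c] <:+: p ++ c :: r := ⟨p, r, by simp⟩
  have hnn : 0 ≤ PySem.Chars.find (p ++ c :: r) [c] :=
    (PySem.Chars.find_nonneg_iff _ _).mpr hinf
  obtain ⟨hpre, hmin⟩ := PySem.Chars.find_spec hnn
  set k := (PySem.Chars.find (p ++ c :: r) [c]).toNat with hk
  have hkp : k = p.length := by
    rcases Nat.lt_trichotomy k p.length with hlt | heq | hgt
    · exfalso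
      have hhead : ((p ++ c :: r).drop k).head? = some c := by
        rcases hpre with ⟨u, hu⟩
        rw [← hu]; rfl
      rw [List.head?_drop] at hhead
      have : (p ++ c :: r)[k]? = p[k]? := List.getElem?_append_left hlt
      rw [this, List.getElem?_eq_getElem hlt] at hhead
      have hkc : p[k] = c := by simpa using hhead
      exact h (hkc ▸ List.getElem_mem hlt)
    · exact heq
    · exfalso
      refine hmin p.length hgt ?_
      have : (p ++ c :: r).drop p.length = c :: r := by
        rw [List.drop_append_of_le_length (by omega)]
        simp
      rw [this]
      exact ⟨r, rfl⟩
  omega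

-- join '' = flatten
lemma pvJoin_nil_flatten : ∀ ps : List (List Char), PySem.Chars.join [] ps = ps.flatten := by
  intro ps
  induction ps with
  | nil => simp [PySem.Chars.join_nil]
  | cons p qs ih =>
    cases qs with
    | nil => simp [PySem.Chars.join_singleton]
    | cons q rest =>
      rw [PySem.Chars.join_cons_cons, ih]
      simp

lemma pvPieces_flatten (ts : List (List Char)) : (pvPieces ts).flatten = pvEmit ts := by
  induction ts with
  | nil => simp [pvPieces, pvEmit]
  | cons t ts ih =>
    rw [pvPieces, pvEmit]
    split <;> simp [ih]

-- A's loop over glued tokens produces pvEmit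
lemma pvLoopA_glue : ∀ (ts : List (List Char)),
    (∀ t ∈ ts, '(' ∉ t ∧ pvTokOk t) → ∀ acc : List Char,
    pvLoopA (ts.flatMap (fun t => '(' :: t)) acc = acc ++ pvEmit ts := by
  intro ts
  induction ts with
  | nil => intro _ acc; simp [pvLoopA, pvEmit]
  | cons t ts ih =>
    intro h acc
    obtain ⟨hpar, hcl, hdig, hfix⟩ := h t (by simp)
    have hts : ∀ x ∈ ts, '(' ∉ x ∧ pvTokOk x := fun x hx => h x (by simp [hx])
    have hdec : t = t.takeWhile (· ≠ ')') ++ ')' :: (t.dropWhile (· ≠ ')')).tail :=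
      pvTok_decomp ')' t hcl
    have hnai : ')' ∉ t.takeWhile (· ≠ ')') := pvNotMem_takeWhile ')' t
    have hpai : '(' ∉ t.takeWhile (· ≠ ')') := fun hm => hpar (hdec ▸ List.mem_append_left _ hm)
    have hpv : '(' ∉ (t.dropWhile (· ≠ ')')).tail := by
      intro hm
      exact hpar (hdec ▸ List.mem_append_right _ (List.mem_cons_of_mem _ hm))
    set ai := t.takeWhile (· ≠ ')') with hai
    set v := (t.dropWhile (· ≠ ')')).tail with hv
    have hflat : (t :: ts).flatMap (fun t => '(' :: t)
        = '(' :: (ai ++ ')' :: (v ++ ts.flatMap (fun t => '(' :: t))) := by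
      rw [List.flatMap_cons]
      conv_lhs => rw [hdec]
      simp
    rw [hflat, pvLoopA]
    simp only [ne_eq, not_true_eq_false, if_neg, ite_false, reduceIte]
    rw [pvFind_append_cons ')' ai _ hnai]
    rw [if_neg (by omega)]
    have htoNat : ((ai.length : Int)).toNat = ai.length := Int.toNat_natCast _
    rw [htoNat, List.take_left, hdig]
    simp only [Bool.true_eq_false, if_neg, ite_false, reduceIte]
    have hdrop : (ai ++ ')' :: (v ++ ts.flatMap (fun t => '(' :: t))).drop (ai.length + 1)
        = v ++ ts.flatMap (fun t => '(' :: t) := by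
      have : ai ++ ')' :: (v ++ ts.flatMap (fun t => '(' :: t))
          = (ai ++ [')']) ++ (v ++ ts.flatMap (fun t => '(' :: t)) := by simp
      rw [this, List.drop_left' (by simp)]
    rw [hdrop]
    cases ts with
    | nil =>
      simp only [List.flatMap_nil, List.append_nil]
      rw [pvFind_not_mem '(' v hpv]
      simp only [reduceIte, ite_true, if_pos rfl]
      rw [if_neg (by intro hc; exact hc.2 (hfix hc.1))]
      simp only [ne_eq, not_true_eq_false, and_false, ite_false, reduceIte]
      rw [pvLoopA]
      simp only [ne_eq, decide_not] at hai hv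
      simp [pvEmit, ← hai, ← hv]
    | cons t' ts' =>
      rw [List.flatMap_cons]
      have hflat2 : v ++ ('(' :: t' ++ ts'.flatMap (fun t => '(' :: t))
          = v ++ '(' :: (t' ++ ts'.flatMap (fun t => '(' :: t)) := by simp
      rw [hflat2, pvFind_append_cons '(' v _ hpv]
      have hne : ¬ ((v.length : Int) = -1) := by omega
      have htoNat2 : ((v.length : Int)).toNat = v.length := Int.toNat_natCast _
      simp only [if_neg hne, htoNat2, List.take_left, List.drop_left]
      rw [if_neg (by intro hc; exact hc.2 (hfix hc.1))]
      have hglue : ('(' :: (t' ++ ts'.flatMap (fun t => '(' :: t)))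
          = (t' :: ts').flatMap (fun t => '(' :: t) := by simp
      rw [hglue, ih hts]
      conv_rhs => rw [pvEmit]
      simp only [ne_eq, decide_not] at hai hv
      simp only [ne_eq, hne, not_false_eq_true, and_true, List.cons_ne_nil, ← hai, ← hv]
      split <;> simp [← hai, ← hv]

-- B's first pass succeeds on well-formed tokens
lemma pvParse_eq : ∀ (ts : List (List Char)), (∀ t ∈ ts, pvTokOk t) →
    pvParse ts = some (ts.map (fun t => (t.takeWhile (· ≠ ')'), (t.dropWhile (· ≠ ')')).tail))) := by
  intro ts
  induction ts with
  | nil => intro _; rfl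
  | cons t ts ih =>
    intro h
    obtain ⟨hcl, hdig, -⟩ := h t (by simp)
    rw [pvParse, pvSplitOnMax_one_mem ')' t hcl]
    rw [ih (fun x hx => h x (by simp [hx]))]
    have hdig' := hdig
    simp only [ne_eq, decide_not] at hdig'
    simp [hdig']

-- B's second pass produces pvPieces
lemma pvBuild_eq : ∀ (ts : List (List Char)) (s n : Int) (out : List (List Char)),
    (∀ t ∈ ts, pvTokOk t) → s + ts.length = n →
    (PySem.List.enumerate (ts.map (fun t => (t.takeWhile (· ≠ ')'), (t.dropWhile (· ≠ ')')).tail))) s).foldl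
        (pvBStep n) (some out)
      = some (out ++ pvPieces ts) := by
  intro ts
  induction ts with
  | nil => intro s n out _ _; simp [pvPieces, PySem.List.enumerate_nil]
  | cons t ts ih =>
    intro s n out h hn
    obtain ⟨hcl, hdig, hfix⟩ := h t (by simp)
    rw [List.map_cons, PySem.List.enumerate_cons, List.foldl_cons]
    have hstep : pvBStep n (some out) (s, (t.takeWhile (· ≠ ')'), (t.dropWhile (· ≠ ')')).tail))
        = some ((out ++ [('(' :: t.takeWhile (· ≠ ')') ++ ')' :: (t.dropWhile (· ≠ ')')).tail)])
            ++ (if pvFixedAIs.contains (String.ofList (t.takeWhile (· ≠ ')'))) = false ∧ ts ≠ []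
                then [[pvFNC1]] else [])) := by
      rw [pvBStep]
      simp only [Option.bind_some]
      rw [if_neg (by intro hc; exact hc.2 (hfix hc.1))]
      have hiff : (s < n - 1) = (ts ≠ []) := by
        simp only [eq_iff_iff]
        constructor
        · intro hlt hnil
          subst hnil
          simp at hn
          omega
        · intro hnil
          have : 1 ≤ (ts.length : Int) := by
            cases ts with
            | nil => exact absurd rfl hnil
            | cons a b => push_cast [List.length_cons]; omega
          push_cast [List.length_cons] at hn ⊢
          omega
      simp only [List.length_cons] at hn ⊢
      simp only [hiff]
      split <;> simp
    rw [hstep, ih (s + 1) n _ (fun x hx => h x (by simp [hx])) (by push_cast [List.length_cons] at hn ⊢; omega)]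
    rw [pvPieces]
    split <;> simp

-- ===== VERDICT (by name: the statement is the Claim_ definition above) =====
theorem format_gs1_data_spec : Claim_equal_format_gs1_data := by
  intro data _ hpre
  unfold Spec_format_gs1_data format_gs1_data format_gs1_data_alt
  by_cases hs : PySem.Str.startswith data "(" = true
  · have hs' : PySem.Chars.startswith data.toList ['('] = true := by simpa using hs
    have htoks : ∀ t ∈ (PySem.Chars.splitOn data.toList ['(']).tail, pvTokOk t := hpre hs
    obtain ⟨cs, hcs⟩ : ∃ cs, data.toList = '(' :: cs := by
      have h1 : PySem.Chars.startswith data.toList ['('] = true := by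
        have := PySem.Str.startswith_eq data "("
        rw [show ("(" : String).toList = ['('] from rfl] at this
        rw [← this]; exact hs
      obtain ⟨u, hu⟩ := (PySem.Chars.startswith_iff _ _).mp h1
      exact ⟨u, hu.symm⟩
    rw [if_neg (by simp [hs']), if_neg (by simp [hs'])]
    have htail : (PySem.Chars.splitOn data.toList ['(']).tail = PySem.Chars.splitOn cs ['('] := by
      rw [hcs, pvSplitOn_cons_self]; rfl
    have hok : ∀ t ∈ PySem.Chars.splitOn cs ['('], pvTokOk t := by
      rw [htail] at htoks; exact htoks
    have hnm : ∀ t ∈ PySem.Chars.splitOn cs ['('], '(' ∉ t := pvSplitOn_not_mem '(' cs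
    have hA : pvLoopA data.toList [pvFNC1]
        = [pvFNC1] ++ pvEmit (PySem.Chars.splitOn cs ['(']) := by
      rw [hcs, ← pvSplitOn_glue '(' cs]
      exact pvLoopA_glue _ (fun t ht => ⟨hnm t ht, hok t ht⟩) [pvFNC1]
    have hb := pvBuild_eq (PySem.Chars.splitOn cs ['(']) 0
        ((((PySem.Chars.splitOn cs ['(']).map
            (fun t => (t.takeWhile (· ≠ ')'), (t.dropWhile (· ≠ ')')).tail))).length : Int))
        [[pvFNC1]] hok (by simp)
    rw [hA]
    simp only [htail, pvParse_eq _ hok, hb, pvJoin_nil_flatten]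
    simp [pvPieces_flatten]
  · have hs' : PySem.Chars.startswith data.toList ['('] = false := by simpa using hs
    rw [if_pos (by simp [hs']), if_pos (by simp [hs'])]
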